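-- pv_equiv track=rewrite | github.com/ptarau/Tree-based-Arithmetic-Systems-in-Python | treenums/set2seq.py | seq2set
-- ===== SOURCE A (Python) =====
-- def seq2set(xs) :
--   def loop():
--     s = -1
--     for x in xs:
--       sx=x+1
--       s+=sx
--       yield s
--   return list(loop())
-- ===== SOURCE B (Python) =====
-- def seq2set(xs):
--     # Back-to-front: the last output is sum(xs)+len(xs)-1 in closed form;
--     # walk the list in reverse, emitting the running value and subtracting x+1.
--     out = []
--     t = sum(xs) + len(xs) - 1
--     for x in reversed(xs):
--         out.append(t)
--         t -= x + 1
--     out.reverse()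
--     return out
-- ===== Notes on version B (the rewrite author's own statement) =====
-- stated objective: alternative
-- what changed: A accumulates forwards (s += x+1, yielding each step); B computes the final value in closed form as sum(xs)+len(xs)-1 and builds the output back-to-front by subtracting x+1 while walking the reversed list, then reverses.
import Mathlib
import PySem

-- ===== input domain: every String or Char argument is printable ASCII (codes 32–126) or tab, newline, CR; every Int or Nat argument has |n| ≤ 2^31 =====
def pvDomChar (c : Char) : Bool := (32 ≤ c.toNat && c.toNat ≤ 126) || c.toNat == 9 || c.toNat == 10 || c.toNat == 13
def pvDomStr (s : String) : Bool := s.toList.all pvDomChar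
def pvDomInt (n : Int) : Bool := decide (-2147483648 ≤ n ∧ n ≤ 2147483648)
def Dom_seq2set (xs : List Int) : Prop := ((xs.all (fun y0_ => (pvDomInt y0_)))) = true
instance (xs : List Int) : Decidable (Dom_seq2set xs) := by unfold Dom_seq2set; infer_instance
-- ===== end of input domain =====

-- B replaces A's forward accumulator fold with a closed-form final value
-- (sum xs + length xs - 1) and a back-to-front subtraction pass (alternative, same cost).


-- ===== PORT A =====
-- A's generator: s starts at -1, each step s += x+1 and yields s; list(...) collects the yields.
def seq2setLoop (xs : List Int) (s : Int) : List Int :=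
  match xs with
  | [] => []
  | x :: rest => (s + (x + 1)) :: seq2setLoop rest (s + (x + 1))

def seq2set (xs : List Int) : List Int := seq2setLoop xs (-1)

-- ===== PORT B =====
-- for x in reversed(xs): out.append(t); t -= x+1   — out accumulated, reversed at the end
def backPass (rs : List Int) (t : Int) (out : List Int) : List Int :=
  match rs with
  | [] => out
  | x :: rest => backPass rest (t - (x + 1)) (out ++ [t])

def seq2set_alt (xs : List Int) : List Int :=
  (backPass xs.reverse (xs.sum + xs.length - 1) []).reverse

-- ===== PRECONDITION & SPEC =====
def Spec_seq2set (xs : List Int) (out : List Int) : Prop := out = seq2set_alt xs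
instance (xs : List Int) (out : List Int) : Decidable (Spec_seq2set xs out) := by unfold Spec_seq2set; infer_instance

-- ===== CLAIM (what is proved, stated in full; the proofs are below) =====
def Claim_equal_seq2set : Prop := ∀ (xs : List Int), Dom_seq2set xs → Spec_seq2set xs (seq2set xs)

-- ===== LEMMAS AND PROOFS =====
lemma backPass_acc (rs : List Int) : ∀ (t : Int) (out : List Int),
    backPass rs t out = out ++ backPass rs t [] := by
  induction rs with
  | nil => simp [backPass]
  | cons x rest ih =>
    intro t out
    rw [backPass, backPass, ih (t - (x + 1)) (out ++ [t]), ih (t - (x + 1)) ([] ++ [t])]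
    simp

-- A's loop on xs with start s, written as B's backward pass on the reversed list.
lemma loop_eq_back (xs : List Int) : ∀ (s : Int),
    seq2setLoop xs s = (backPass xs.reverse (s + xs.sum + xs.length) []).reverse := by
  induction xs with
  | nil => intro s; simp [seq2setLoop, backPass]
  | cons x rest ih =>
    intro s
    have key : ∀ (rs : List Int) (t : Int),
        backPass (rs ++ [x]) t [] = backPass rs t [] ++ [t - (rs.sum + rs.length)] := by
      intro rs
      induction rs with
      | nil => intro t; simp [backPass]
      | cons y ys ihy =>
        intro t
        simp only [List.cons_append, backPass]
        rw [backPass_acc (ys ++ [x]), backPass_acc ys, ihy]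
        simp only [List.nil_append, List.cons_append, List.cons.injEq, true_and,
          List.append_cancel_left_eq, List.sum_cons, List.length_cons]
        push_cast
        ring
        exact ⟨trivial, trivial⟩
    have harg : s + (x :: rest).sum + ((x :: rest).length : Int)
        = (s + (x + 1)) + rest.sum + rest.length := by
      simp [List.sum_cons]; push_cast; ring
    simp only [seq2setLoop, List.reverse_cons]
    rw [ih (s + (x + 1)), harg, key, List.reverse_append,
      List.sum_reverse, List.length_reverse]
    simp only [List.reverse_cons, List.reverse_nil, List.nil_append, List.cons_append]
    congr 1
    ring

-- ===== VERDICT (by name: the statement is the Claim_ definition above) =====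
theorem seq2set_spec : Claim_equal_seq2set := by
  intro xs _
  show seq2set xs = seq2set_alt xs
  rw [seq2set, seq2set_alt, loop_eq_back xs (-1)]
  congr 2
  ring
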